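-- pv_equiv track=rewrite | github.com/backenddeveloper/ForSecond | forsecond/graph.py | find_most_philoprogenitive_node
-- ===== SOURCE A (Python) =====
-- def find_most_philoprogenitive_node(graph):
--
--     # This might raise a validation exception
--     # TODO: implement
--     # validate_graph(graph)
--
--     max_reachable_count = 0
--     max_reachable_node = None
--
--     for node in graph:
--
--         visited = {n: False for n in graph}
--         count = [0]
--         depth_first_search_count_reachable(graph, node, visited, count)
--
--         if count[0] > max_reachable_count:
--
--             max_reachable_count = count[0]
--             max_reachable_node = node
--
--     return max_reachable_node, max_reachable_count
--
-- def depth_first_search_count_reachable(graph, node, visited, count):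
--
--     visited[node] = True
--     count[0] += 1
--
--     for neighbor in graph[node]:
--
--         if not visited[neighbor]:
--
--             depth_first_search_count_reachable(graph, neighbor, visited, count)
-- ===== SOURCE B (Python) =====
-- def find_most_philoprogenitive_node(graph):
--
--     best_node, best_count = None, 0
--
--     for start in graph:
--
--         # iterative DFS with an explicit stack of neighbour iterators
--         visited = set()
--         stack = [iter([start])]
--
--         while stack:
--             n = next(stack[-1], None)
--             if n is None:
--                 stack.pop()
--             elif n not in visited:
--                 visited.add(n)
--                 stack.append(iter(graph[n]))
--
--         if len(visited) > best_count:
--             best_node, best_count = start, len(visited)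
--
--     return best_node, best_count
-- ===== Notes on version B (the rewrite author's own statement) =====
-- stated objective: simpler
-- what changed: The recursive helper with its mutable count cell and per-start all-keys visited dict is replaced by a single iterative DFS loop over an explicit stack of neighbour iterators with a visited set, count = len(visited); outer strict-greater argmax unchanged.
import Mathlib
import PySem

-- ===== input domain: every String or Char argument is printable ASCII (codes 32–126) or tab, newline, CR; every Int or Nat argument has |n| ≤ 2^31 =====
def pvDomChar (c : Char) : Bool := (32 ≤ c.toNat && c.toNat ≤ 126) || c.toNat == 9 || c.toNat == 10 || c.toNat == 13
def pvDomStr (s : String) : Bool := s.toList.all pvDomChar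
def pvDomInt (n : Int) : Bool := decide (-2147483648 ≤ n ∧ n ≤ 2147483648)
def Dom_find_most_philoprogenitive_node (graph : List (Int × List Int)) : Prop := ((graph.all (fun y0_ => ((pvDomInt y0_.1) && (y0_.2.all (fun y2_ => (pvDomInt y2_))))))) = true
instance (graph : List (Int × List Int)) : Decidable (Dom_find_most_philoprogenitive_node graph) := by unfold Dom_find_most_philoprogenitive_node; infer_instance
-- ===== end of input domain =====

-- B replaces A's recursive DFS helper (mutable count cell, per-start visited dict over all keys)
-- by one iterative DFS loop over an explicit stack of neighbour iterators with a visited set (simpler).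

-- ===== PORT A =====
-- graph[node]: Python raises KeyError on a missing key; the total form defaults to [] only
-- outside Pre_ (which requires every neighbour to be a key).
def pvAdj (g : List (Int × List Int)) (n : Int) : List Int :=
  (PySem.Dict.mk g).getD n []

-- A's recursive depth_first_search_count_reachable. The Nat argument is depth fuel for totality
-- only: the chain of active calls marks pairwise-distinct keys, so the recursion depth never
-- exceeds the number of keys and the fuel graph.length + 1 supplied below is never exhausted.
-- visited[neighbor]: Python raises KeyError on a missing key; the default true ("skip") applies
-- only outside Pre_.
def pvDfsA (g : List (Int × List Int)) :
    Nat → Int → PySem.Dict Int Bool × Int → PySem.Dict Int Bool × Int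
  | 0, _, st => st
  | f+1, node, st =>
    let st1 : PySem.Dict Int Bool × Int := (st.1.insert node true, st.2 + 1)
    (pvAdj g node).foldl
      (fun st2 nb => if PySem.Dict.getD st2.1 nb true = false then pvDfsA g f nb st2 else st2)
      st1

def find_most_philoprogenitive_node (graph : List (Int × List Int)) : Option Int × Int :=
  graph.foldl
    (fun acc p =>
      let visited : PySem.Dict Int Bool := PySem.Dict.mk (graph.map (fun q => (q.1, false)))
      let st := pvDfsA graph (graph.length + 1) p.1 (visited, 0)
      if st.2 > acc.2 then (some p.1, st.2) else acc)
    (none, 0)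

-- ===== PORT B =====
-- termination helper for pvRunB (cited in its decreasing_by)
lemma pvFilter_le_of_subset (U S S' : List Int) (h : ∀ x ∈ S, x ∈ S') :
    (U.filter (fun x => decide (x ∉ S'))).length ≤ (U.filter (fun x => decide (x ∉ S))).length := by
  apply List.Sublist.length_le
  apply List.monotone_filter_right
  intro x hx
  simp at hx ⊢
  exact fun hmem => hx (h x hmem)

lemma pvFilter_append_lt (U S : List Int) (n : Int) (hU : n ∈ U) (hS : n ∉ S) :
    (U.filter (fun x => decide (x ∉ S ++ [n]))).length
      < (U.filter (fun x => decide (x ∉ S))).length := by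
  induction U with
  | nil => cases hU
  | cons u t ih =>
    rcases List.mem_cons.mp hU with h | h
    · subst h
      have hle := pvFilter_le_of_subset t S (S ++ [n]) (fun x hx => List.mem_append_left _ hx)
      simp [hS] at hle ⊢
      omega
    · have hlt := ih h
      by_cases hu : u ∈ S
      · simp [hu] at hlt ⊢
        omega
      · by_cases hun : u = n
        · subst hun
          simp [hu] at hlt ⊢
          omega
        · simp [hu, hun] at hlt ⊢
          omega

def pvUniv (g : List (Int × List Int)) : List Int :=
  g.map Prod.fst ++ (g.map Prod.snd).flatten

-- B's while loop: stack of neighbour iterators (top list = what remains of the top iterator).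
-- The n ∈ U test is a totality guard only: every element ever on the stack is the start key or
-- some adjacency-list entry, all of which lie in pvUniv g, so the guard is always true.
def pvRunB (g : List (Int × List Int)) (U : List Int) :
    List (List Int) → List Int → List Int
  | [], vis => vis
  | [] :: rest, vis => pvRunB g U rest vis
  | (n :: ns) :: rest, vis =>
    if n ∈ vis then pvRunB g U (ns :: rest) vis
    else if _hU : n ∈ U then
      pvRunB g U (pvAdj g n :: ns :: rest) (PySem.Set.add vis n)
    else vis  -- unreachable (see guard comment above)
termination_by stk vis => ((U.filter (fun x => decide (x ∉ vis))).length, (stk.map List.length).sum + stk.length)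
decreasing_by
  · apply Prod.Lex.right
    simp
  · apply Prod.Lex.right
    simp
  · apply Prod.Lex.left
    have hnot : n ∉ vis := by simpa using ‹¬ n ∈ vis›
    rw [PySem.Set.add_of_not_mem hnot]
    exact pvFilter_append_lt U vis n ‹n ∈ U› hnot

def find_most_philoprogenitive_node_alt (graph : List (Int × List Int)) : Option Int × Int :=
  graph.foldl
    (fun acc p =>
      let vis := pvRunB graph (pvUniv graph) [[p.1]] []
      if (vis.length : Int) > acc.2 then (some p.1, (vis.length : Int)) else acc)
    (none, 0)

-- ===== PRECONDITION & SPEC =====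
-- Pre_ excludes (a) graphs in which some adjacency list contains an integer that is not a key:
-- there Python A raises KeyError (at visited[neighbor]); and (b) duplicate keys, which cannot
-- arise from a Python dict argument.
def Pre_find_most_philoprogenitive_node (graph : List (Int × List Int)) : Prop :=
  (graph.map Prod.fst).Nodup ∧ ∀ p ∈ graph, ∀ n ∈ p.2, n ∈ graph.map Prod.fst

instance (graph : List (Int × List Int)) : Decidable (Pre_find_most_philoprogenitive_node graph) := by
  unfold Pre_find_most_philoprogenitive_node; infer_instance

def pvWitness_find_most_philoprogenitive_node : (List (Int × List Int)) :=
  [(0, [1]), (1, [0]), (2, [])]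

def Spec_find_most_philoprogenitive_node (graph : List (Int × List Int)) (out : Option Int × Int) : Prop := out = find_most_philoprogenitive_node_alt graph
instance (graph : List (Int × List Int)) (out : Option Int × Int) : Decidable (Spec_find_most_philoprogenitive_node graph out) := by unfold Spec_find_most_philoprogenitive_node; infer_instance

-- ===== CLAIM (what is proved, stated in full; the proofs are below) =====
def Claim_equal_find_most_philoprogenitive_node : Prop := ∀ (graph : List (Int × List Int)), Dom_find_most_philoprogenitive_node graph → Pre_find_most_philoprogenitive_node graph → Spec_find_most_philoprogenitive_node graph (find_most_philoprogenitive_node graph)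

-- ===== LEMMAS AND PROOFS =====

-- the visited dict A maintains, as a function of the set S of visited nodes
def pvVisMap (g : List (Int × List Int)) (S : List Int) : PySem.Dict Int Bool :=
  PySem.Dict.mk (g.map (fun q => (q.1, decide (q.1 ∈ S))))

lemma pvGet?_visMap (g : List (Int × List Int)) (S : List Int) (n : Int) :
    (pvVisMap g S).get? n = if n ∈ g.map Prod.fst then some (decide (n ∈ S)) else none := by
  induction g with
  | nil => simp [pvVisMap, PySem.Dict.get?]
  | cons p t ih =>
    simp only [pvVisMap, List.map_cons, PySem.Dict.get?_mk_cons] at *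
    by_cases h : p.1 = n
    · subst h; simp
    · have hmem : (n ∈ p.1 :: List.map Prod.fst t) ↔ n ∈ List.map Prod.fst t := by
        constructor
        · intro hh
          rcases List.mem_cons.mp hh with hh | hh
          · exact absurd hh.symm h
          · exact hh
        · exact fun hh => List.mem_cons_of_mem _ hh
      by_cases hm : n ∈ List.map Prod.fst t <;> simp [h, ih, hm, hmem]

lemma pvGetD_visMap (g : List (Int × List Int)) (S : List Int) (n : Int) (d : Bool) :
    (pvVisMap g S).getD n d = if n ∈ g.map Prod.fst then decide (n ∈ S) else d := by
  rw [PySem.Dict.getD_eq_get?_getD, pvGet?_visMap]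
  by_cases h : n ∈ g.map Prod.fst <;> simp [h]

lemma pvInsert_visMap (g : List (Int × List Int)) (S : List Int) (n : Int)
    (hk : n ∈ g.map Prod.fst) :
    (pvVisMap g S).insert n true = pvVisMap g (S ++ [n]) := by
  have hc : (pvVisMap g S).contains n = true := by
    rw [PySem.Dict.contains_iff_mem_keys]
    simpa [pvVisMap, PySem.Dict.keys_mk, List.map_map] using hk
  apply PySem.Dict.ext
  rw [PySem.Dict.items_insert_of_contains _ true hc]
  show (g.map (fun q => (q.1, decide (q.1 ∈ S)))).map _ = (g.map _)
  rw [List.map_map]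
  apply List.map_congr_left
  intro q hq
  by_cases h : q.1 = n
  · simp [h]
  · simp [h]

lemma pvAdj_of_key (g : List (Int × List Int)) (n : Int) (h : n ∈ g.map Prod.fst) :
    ∃ p, p ∈ g ∧ p.1 = n ∧ pvAdj g n = p.2 := by
  induction g with
  | nil => simp at h
  | cons p t ih =>
    obtain ⟨k, v⟩ := p
    rw [List.map_cons, List.mem_cons] at h
    by_cases hp : k = n
    · exact ⟨(k, v), List.mem_cons_self .., hp, by
        simp [pvAdj, PySem.Dict.getD_eq_get?_getD, PySem.Dict.get?_mk_cons, hp]⟩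
    · have hn : n ∈ t.map Prod.fst := by
        rcases h with h | h
        · exact absurd h.symm hp
        · exact h
      obtain ⟨q, hq, h1, h2⟩ := ih hn
      refine ⟨q, List.mem_cons_of_mem _ hq, h1, ?_⟩
      rw [pvAdj, PySem.Dict.getD_eq_get?_getD] at h2
      rw [pvAdj, PySem.Dict.getD_eq_get?_getD, PySem.Dict.get?_mk_cons]
      simpa [hp] using h2

-- the simulation: A's neighbour fold at state (pvVisMap S, |S|) and B's machine with the same
-- pending list on top of the stack compute the same enlarged visited set S'
lemma pvSim (g : List (Int × List Int))
    (hcl : ∀ p ∈ g, ∀ n ∈ p.2, n ∈ g.map Prod.fst) :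
    ∀ (f : Nat) (ns S : List Int),
      (∀ n ∈ ns, n ∈ g.map Prod.fst) →
      (∀ n ∈ S, n ∈ g.map Prod.fst) →
      S.Nodup →
      ((g.map Prod.fst).filter (fun x => decide (x ∉ S))).length ≤ f →
      ∃ S', S <+: S' ∧ S'.Nodup ∧ (∀ n ∈ S', n ∈ g.map Prod.fst) ∧
        ((g.map Prod.fst).filter (fun x => decide (x ∉ S'))).length
          ≤ ((g.map Prod.fst).filter (fun x => decide (x ∉ S))).length ∧
        (ns.foldl
            (fun st2 nb => if PySem.Dict.getD st2.1 nb true = false then pvDfsA g f nb st2 else st2)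
            (pvVisMap g S, (S.length : Int))
          = (pvVisMap g S', (S'.length : Int))) ∧
        ∀ stk, pvRunB g (pvUniv g) (ns :: stk) S = pvRunB g (pvUniv g) stk S' := by
  intro f0
  induction f0 using Nat.strong_induction_on with
  | _ f IHf =>
    intro ns
    induction ns with
    | nil =>
      intro S hns hS hndS hfuel
      refine ⟨S, List.prefix_refl S, hndS, hS, le_refl _, rfl, ?_⟩
      intro stk
      rw [pvRunB]
    | cons n ns' IHns =>
      intro S hns hS hndS hfuel
      have hkey : n ∈ g.map Prod.fst := hns n (List.mem_cons_self ..)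
      by_cases hmem : n ∈ S
      · have hstep : PySem.Dict.getD (pvVisMap g S) n true = true := by
          rw [pvGetD_visMap]; simp [hkey, hmem]
        obtain ⟨S', hpre, hnd', hsub', hfl, hfold, hrun⟩ :=
          IHns S (fun m hm => hns m (List.mem_cons_of_mem _ hm)) hS hndS hfuel
        refine ⟨S', hpre, hnd', hsub', hfl, ?_, ?_⟩
        · rw [List.foldl_cons]
          simpa [hstep] using hfold
        · intro stk
          rw [pvRunB]
          rw [if_pos hmem]
          exact hrun stk
      · have hgetD : PySem.Dict.getD (pvVisMap g S) n true = false := by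
          rw [pvGetD_visMap]; simp [hkey, hmem]
        have hf1 : 1 ≤ f := by
          have hmemf : n ∈ (g.map Prod.fst).filter (fun x => decide (x ∉ S)) := by
            simp [List.mem_filter, hkey, hmem]
          have hpos := List.length_pos_of_mem hmemf
          omega
        obtain ⟨f', rfl⟩ : ∃ f', f = f' + 1 := ⟨f - 1, by omega⟩
        have hadj : ∀ m ∈ pvAdj g n, m ∈ g.map Prod.fst := by
          obtain ⟨p, hp, hp1, hp2⟩ := pvAdj_of_key g n hkey
          rw [hp2]; exact fun m hm => hcl p hp m hm
        have hSn : ∀ m ∈ S ++ [n], m ∈ g.map Prod.fst := by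
          intro m hm
          rcases List.mem_append.mp hm with hm | hm
          · exact hS m hm
          · simp at hm; subst hm; exact hkey
        have hndSn : (S ++ [n]).Nodup := by
          refine List.Nodup.append hndS (List.nodup_singleton n) ?_
          intro a ha hb
          simp only [List.mem_singleton] at hb
          exact hmem (hb ▸ ha)
        have hstrict := pvFilter_append_lt (g.map Prod.fst) S n hkey hmem
        have hfuel' :
            ((g.map Prod.fst).filter (fun x => decide (x ∉ S ++ [n]))).length ≤ f' := by
          omega
        obtain ⟨S₁, hpre₁, hnd₁, hsub₁, hfl₁, hfold₁, hrun₁⟩ :=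
          IHf f' (by omega) (pvAdj g n) (S ++ [n]) hadj hSn hndSn hfuel'
        have hfuelS₁ :
            ((g.map Prod.fst).filter (fun x => decide (x ∉ S₁))).length ≤ f' + 1 := by
          omega
        obtain ⟨S₂, hpre₂, hnd₂, hsub₂, hfl₂, hfold₂, hrun₂⟩ :=
          IHns S₁ (fun m hm => hns m (List.mem_cons_of_mem _ hm)) hsub₁ hnd₁ hfuelS₁
        refine ⟨S₂, ?_, hnd₂, hsub₂, by omega, ?_, ?_⟩
        · exact List.IsPrefix.trans (List.prefix_append S [n]) (List.IsPrefix.trans hpre₁ hpre₂)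
        · rw [List.foldl_cons]
          have hdfs : pvDfsA g (f' + 1) n (pvVisMap g S, (S.length : Int))
              = (pvVisMap g S₁, (S₁.length : Int)) := by
            rw [pvDfsA]
            simp only []
            rw [pvInsert_visMap g S n hkey]
            have hlen : (S.length : Int) + 1 = ((S ++ [n]).length : Int) := by
              simp
            rw [hlen]
            exact hfold₁
          simpa [hgetD, hdfs] using hfold₂
        · intro stk
          rw [pvRunB]
          rw [if_neg hmem]
          have hUmem : n ∈ pvUniv g := List.mem_append_left _ hkey
          rw [dif_pos hUmem]
          rw [PySem.Set.add_of_not_mem hmem]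
          rw [hrun₁ (ns' :: stk)]
          exact hrun₂ stk

-- per start node, A's count equals B's len(visited)
lemma pvCount_eq (g : List (Int × List Int))
    (hcl : ∀ p ∈ g, ∀ n ∈ p.2, n ∈ g.map Prod.fst)
    (k : Int) (hk : k ∈ g.map Prod.fst) :
    (pvDfsA g (g.length + 1) k (PySem.Dict.mk (g.map (fun q => (q.1, false))), 0)).2
      = ((pvRunB g (pvUniv g) [[k]] []).length : Int) := by
  have hvis0 : PySem.Dict.mk (g.map (fun q => (q.1, false))) = pvVisMap g [] := by
    simp [pvVisMap]
  have hadj : ∀ m ∈ pvAdj g k, m ∈ g.map Prod.fst := by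
    obtain ⟨p, hp, hp1, hp2⟩ := pvAdj_of_key g k hk
    rw [hp2]; exact fun m hm => hcl p hp m hm
  have hfuel : ((g.map Prod.fst).filter (fun x => decide (x ∉ ([] : List Int) ++ [k]))).length
      ≤ g.length := by
    have h1 := List.length_filter_le (fun x => decide (x ∉ ([] : List Int) ++ [k])) (g.map Prod.fst)
    simpa using h1
  obtain ⟨S', hpre, hnd', hsub', hfl, hfold, hrun⟩ :=
    pvSim g hcl g.length (pvAdj g k) ([] ++ [k]) hadj
      (by intro m hm; simp at hm; subst hm; exact hk)
      (by simp) hfuel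
  have hA : pvDfsA g (g.length + 1) k (PySem.Dict.mk (g.map (fun q => (q.1, false))), 0)
      = (pvVisMap g S', (S'.length : Int)) := by
    rw [hvis0, pvDfsA]
    simp only []
    rw [pvInsert_visMap g [] k hk]
    have h01 : ((0 : Int) + 1) = ((([] : List Int) ++ [k]).length : Int) := by simp
    rw [h01]
    exact hfold
  have hUk : k ∈ pvUniv g := List.mem_append_left _ hk
  have hB : pvRunB g (pvUniv g) [[k]] [] = S' := by
    rw [pvRunB]
    rw [if_neg (List.not_mem_nil)]
    rw [dif_pos hUk]
    have hadd : PySem.Set.add ([] : List Int) k = [] ++ [k] := by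
      rw [PySem.Set.add_of_not_mem (List.not_mem_nil)]
    rw [hadd]
    rw [hrun [[]]]
    rw [pvRunB, pvRunB]
  rw [hA, hB]

-- ===== VERDICT (by name: the statement is the Claim_ definition above) =====
theorem find_most_philoprogenitive_node_spec : Claim_equal_find_most_philoprogenitive_node := by
  intro graph _hdom hpre
  unfold Spec_find_most_philoprogenitive_node
  unfold find_most_philoprogenitive_node find_most_philoprogenitive_node_alt
  refine PySem.List.foldl_congr_mem graph _ _ (none, 0) ?_
  intro acc p hp
  have hk : p.1 ∈ graph.map Prod.fst := List.mem_map_of_mem hp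
  simp only [pvCount_eq graph hpre.2 p.1 hk]
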